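-- pv_equiv track=rewrite | github.com/Staszek27/codeforces-repo | preparer.py | delete_improper_things
-- ===== SOURCE A (Python) =====
-- def delete_improper_things(s):
--     res, ok = "", True
--     for e in s:
--         if e == '<':
--             ok = False
--         elif e == '>':
--             ok = True
--             res += '\n'
--         elif ok:
--             res += e
--     return res
-- ===== SOURCE B (Python) =====
-- def delete_improper_things(s):
--     keep = []
--     i, n = 0, len(s)
--     while i < n:
--         if s[i] == '<':
--             j = s.find('>', i + 1)
--             i = n if j == -1 else j
--         else:
--             keep.append(s[i])
--             i += 1
--     return ''.join(keep).replace('>', '\n')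
-- ===== Notes on version B (the rewrite author's own statement) =====
-- stated objective: alternative
-- what changed: Replaced the flag-state character loop with an index scan that jumps past each stripped segment via str.find, collects surviving characters raw, and performs the newline substitution in one final replace call.
import Mathlib
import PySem

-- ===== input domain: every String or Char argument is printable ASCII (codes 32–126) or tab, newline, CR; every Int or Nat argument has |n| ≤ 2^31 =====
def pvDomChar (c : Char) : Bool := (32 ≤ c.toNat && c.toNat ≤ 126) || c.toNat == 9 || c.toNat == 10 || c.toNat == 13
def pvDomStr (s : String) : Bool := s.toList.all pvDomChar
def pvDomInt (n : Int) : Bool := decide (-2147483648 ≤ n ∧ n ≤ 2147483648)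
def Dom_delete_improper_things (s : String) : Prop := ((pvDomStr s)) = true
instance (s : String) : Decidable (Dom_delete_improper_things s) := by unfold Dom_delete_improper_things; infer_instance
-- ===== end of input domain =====

-- B replaces A's flag-state character loop by a find-jump skip pass plus one final replace call (alternative decomposition, same cost).


-- ===== PORT A =====
-- A's loop over the characters carrying (res, ok); strings handled as their character lists.
def pvALoop : List Char → List Char → Bool → List Char
  | [], res, _ => res
  | e :: rest, res, ok =>
    if e = '<' then pvALoop rest res false
    else if e = '>' then pvALoop rest (res ++ ['\n']) true
    else if ok then pvALoop rest (res ++ [e]) ok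
    else pvALoop rest res ok

def delete_improper_things (s : String) : String := String.ofList (pvALoop s.toList [] true)

-- ===== PORT B =====
-- B's skip pass: on '<' jump to the next '>' (s.find('>', i+1) = dropWhile (· ≠ '>')), else keep the char.
def pvBSkip : List Char → List Char
  | [] => []
  | c :: rest =>
    if c = '<' then pvBSkip (rest.dropWhile (· ≠ '>'))
    else c :: pvBSkip rest
termination_by l => l.length
decreasing_by
  · exact Nat.lt_succ_of_le (List.length_dropWhile_le _ _)
  · simp

-- the final ''.join(keep).replace('>', '\n') (single-char replace = map)
def delete_improper_things_alt (s : String) : String :=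
  String.ofList ((pvBSkip s.toList).map (fun c => if c = '>' then '\n' else c))

-- ===== PRECONDITION & SPEC =====
def Spec_delete_improper_things (s : String) (out : String) : Prop := out = delete_improper_things_alt s
instance (s : String) (out : String) : Decidable (Spec_delete_improper_things s out) := by unfold Spec_delete_improper_things; infer_instance

-- ===== CLAIM (what is proved, stated in full; the proofs are below) =====
def Claim_equal_delete_improper_things : Prop := ∀ (s : String), Dom_delete_improper_things s → Spec_delete_improper_things s (delete_improper_things s)

-- ===== LEMMAS AND PROOFS =====
-- abbreviation used only in the proofs
def pvRepl (c : Char) : Char := if c = '>' then '\n' else c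

-- Core invariant: with ok = true the loop emits res ++ map pvRepl (pvBSkip l);
-- with ok = false it first skips to the next '>' exactly like B's dropWhile.
theorem pvALoop_eq (l : List Char) :
    (∀ res, pvALoop l res true = res ++ (pvBSkip l).map pvRepl) ∧
    (∀ res, pvALoop l res false = res ++ (pvBSkip (l.dropWhile (· ≠ '>'))).map pvRepl) := by
  induction l with
  | nil => simp [pvALoop, pvBSkip]
  | cons e rest ih =>
    obtain ⟨ihT, ihF⟩ := ih
    constructor
    · intro res
      by_cases h1 : e = '<'
      · subst h1
        rw [pvALoop, if_pos rfl, ihF, pvBSkip]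
        simp
      · by_cases h2 : e = '>'
        · subst h2
          rw [pvALoop, if_neg (by decide), if_pos rfl, ihT, pvBSkip,
            if_neg (by decide)]
          simp [pvRepl]
        · rw [pvALoop, if_neg h1, if_neg h2, if_pos rfl, ihT, pvBSkip, if_neg h1]
          simp [pvRepl, h2]
    · intro res
      by_cases h2 : e = '>'
      · subst h2
        rw [pvALoop, if_neg (by decide), if_pos rfl, ihT]
        have : (('>' :: rest).dropWhile (· ≠ '>')) = '>' :: rest := by
          simp [List.dropWhile]
        rw [this, pvBSkip, if_neg (by decide)]
        simp [pvRepl]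
      · have hdw : ((e :: rest).dropWhile (· ≠ '>')) = rest.dropWhile (· ≠ '>') := by
          simp [List.dropWhile, h2]
        by_cases h1 : e = '<'
        · subst h1
          rw [pvALoop, if_pos rfl, ihF, hdw]
        · rw [pvALoop, if_neg h1, if_neg h2]
          simp only [Bool.false_eq_true, if_false]
          rw [ihF, hdw]

-- ===== VERDICT (by name: the statement is the Claim_ definition above) =====
theorem delete_improper_things_spec : Claim_equal_delete_improper_things := by
  intro s _
  unfold Spec_delete_improper_things delete_improper_things delete_improper_things_alt
  rw [(pvALoop_eq s.toList).1 []]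
  rfl
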